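-- pv_equiv track=rewrite | github.com/Wellan76/code-de-vigen-re | Projet_info_n1.py | IC5
-- ===== SOURCE A (Python) =====
-- def IC5(a:int):
--     str = ""
--     sous_chaine = []
--     for j in range(0,5):
--         for i in range(j,len(a),5):
--             str = str + a[i]
--         sous_chaine.append(str)
--         str = ""
--     return sous_chaine
-- ===== SOURCE B (Python) =====
-- def IC5(a):
--     buckets = [[], [], [], [], []]
--     for i, c in enumerate(a):
--         buckets[i % 5].append(c)
--     return ["".join(b) for b in buckets]
-- ===== Notes on version B (the rewrite author's own statement) =====
-- stated objective: simpler
-- what changed: Replaces A's five separate stride-5 index passes over the string by a single enumerate pass scattering each character into one of 5 list buckets, joined once at the end.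
import Mathlib
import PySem

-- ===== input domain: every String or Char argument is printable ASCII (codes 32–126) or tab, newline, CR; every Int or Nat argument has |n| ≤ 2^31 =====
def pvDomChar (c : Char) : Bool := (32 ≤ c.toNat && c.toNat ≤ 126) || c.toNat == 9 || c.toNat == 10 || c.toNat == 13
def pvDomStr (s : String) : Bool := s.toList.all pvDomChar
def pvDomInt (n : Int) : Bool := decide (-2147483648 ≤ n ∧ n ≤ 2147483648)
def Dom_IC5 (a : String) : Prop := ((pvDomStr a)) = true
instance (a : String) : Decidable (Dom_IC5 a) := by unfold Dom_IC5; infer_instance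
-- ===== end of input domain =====

-- B replaces A's five stride-5 passes over the string by a single enumerate pass
-- scattering each character into one of 5 buckets (objective: simpler, one pass).

-- ===== PORT A =====
-- inner loop 'for i in range(j, len(a), 5): str = str + a[i]' (str kept as List Char)
def IC5_inner (l : List Char) (j : Int) : List Char :=
  (PySem.List.pyRange j (l.length : Int) 5).foldl
    (fun s i => s ++ [PySem.List.pyGetD l i ' ']) []

def IC5 (a : String) : List String :=
  (PySem.List.pyRange 0 5 1).foldl
    (fun sous_chaine j => sous_chaine ++ [String.ofList (IC5_inner a.toList j)]) []

-- ===== PORT B =====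
-- 'for i, c in enumerate(a): buckets[i % 5].append(c)'
def IC5_scatter (l : List Char) : List (List Char) :=
  (PySem.List.enumerate l 0).foldl
    (fun (b : List (List Char)) p =>
      b.set (PySem.Int.mod p.1 5).toNat (b.getD (PySem.Int.mod p.1 5).toNat [] ++ [p.2]))
    [[], [], [], [], []]

def IC5_alt (a : String) : List String :=
  (IC5_scatter a.toList).map (fun b => String.ofList b)

-- ===== PRECONDITION & SPEC =====
def Spec_IC5 (a : String) (out : List String) : Prop := out = IC5_alt a
instance (a : String) (out : List String) : Decidable (Spec_IC5 a out) := by unfold Spec_IC5; infer_instance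

-- ===== CLAIM (what is proved, stated in full; the proofs are below) =====
def Claim_equal_IC5 : Prop := ∀ (a : String), Dom_IC5 a → Spec_IC5 a (IC5 a)

-- ===== LEMMAS AND PROOFS =====

-- the inner foldl is a map over the range
theorem foldl_append_map {α : Type} (g : Int → α) :
    ∀ (R : List Int) (init : List α),
      R.foldl (fun s i => s ++ [g i]) init = init ++ R.map g := by
  intro R
  induction R with
  | nil => intro init; simp
  | cons x xs ih => intro init; simp [List.foldl, ih]

theorem inner_eq_map (l : List Char) (j : Int) :
    IC5_inner l j =
      (PySem.List.pyRange j (l.length : Int) 5).map (fun i => PySem.List.pyGetD l i ' ') := by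
  unfold IC5_inner
  rw [foldl_append_map]
  simp

-- splitting a step-5 range at its possible last element
theorem pyRange_step5_succ (j n : Int) (hj0 : 0 ≤ j) (hj5 : j < 5) (hn : 0 ≤ n) :
    PySem.List.pyRange j (n + 1) 5 =
      PySem.List.pyRange j n 5 ++ (if n % 5 = j then [n] else []) := by
  rw [PySem.List.pyRange_of_pos j (n + 1) (by norm_num),
      PySem.List.pyRange_of_pos j n (by norm_num)]
  by_cases h : n % 5 = j
  · have hjn : j ≤ n := by omega
    have hlt1 : j < n + 1 := by omega
    have e1 : (if j < n + 1 then ((n + 1 - j + 5 - 1) / 5).toNat else 0)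
        = (if j < n then ((n - j + 5 - 1) / 5).toNat else 0) + 1 := by
      split_ifs with h2 h3 <;> omega
    rw [e1, List.range_succ, List.map_append, if_pos h]
    congr 1
    simp only [List.map_cons, List.map_nil]
    congr 1
    split_ifs with h2
    · omega
    · simp at *; omega
  · have e1 : (if j < n + 1 then ((n + 1 - j + 5 - 1) / 5).toNat else 0)
        = (if j < n then ((n - j + 5 - 1) / 5).toNat else 0) := by
      split_ifs with h2 h3 <;> omega
    rw [e1, if_neg h, List.append_nil]

theorem inner_snoc (l : List Char) (c : Char) (j : Int) (hj0 : 0 ≤ j) (hj5 : j < 5) :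
    IC5_inner (l ++ [c]) j =
      IC5_inner l j ++ (if ((l.length : Int)) % 5 = j then [c] else []) := by
  rw [inner_eq_map, inner_eq_map]
  have hlen : ((l ++ [c]).length : Int) = (l.length : Int) + 1 := by simp
  rw [hlen, pyRange_step5_succ j (l.length : Int) hj0 hj5 (by positivity)]
  rw [List.map_append]
  congr 1
  · apply List.map_congr_left
    intro i hi
    rw [PySem.List.mem_pyRange_iff_of_pos (by norm_num)] at hi
    have h0 : 0 ≤ i := le_trans hj0 hi.1
    have h1 : i < ((l.length : Int)) := hi.2.1
    rw [PySem.List.pyGetD_eq_getElem _ ' ' h0 (by simpa using by omega),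
        PySem.List.pyGetD_eq_getElem _ ' ' h0 (by exact_mod_cast h1)]
    have : i.toNat < l.length := by omega
    simp [this]
  · split_ifs with h
    · simp only [List.map_cons, List.map_nil]
      congr 1
      rw [PySem.List.pyGetD_eq_getElem _ ' ' (by positivity) (by simp)]
      simp
    · simp

-- the scatter fold computes exactly the five stride picks
theorem scatter_eq (l : List Char) :
    IC5_scatter l =
      [IC5_inner l 0, IC5_inner l 1, IC5_inner l 2, IC5_inner l 3, IC5_inner l 4] := by
  induction l using List.reverseRecOn with
  | nil => decide
  | append_singleton l c ih =>
      have hstep : IC5_scatter (l ++ [c]) =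
          (IC5_scatter l).set ((PySem.Int.mod (l.length : Int) 5).toNat)
            ((IC5_scatter l).getD ((PySem.Int.mod (l.length : Int) 5).toNat) [] ++ [c]) := by
        unfold IC5_scatter
        rw [PySem.List.enumerate_append, List.foldl_append]
        simp
      rw [hstep, ih]
      have hmod : PySem.Int.mod (l.length : Int) 5 = (l.length : Int) % 5 :=
        PySem.Int.mod_eq_emod_of_pos (by norm_num)
      rw [inner_snoc l c 0 (by norm_num) (by norm_num),
          inner_snoc l c 1 (by norm_num) (by norm_num),
          inner_snoc l c 2 (by norm_num) (by norm_num),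
          inner_snoc l c 3 (by norm_num) (by norm_num),
          inner_snoc l c 4 (by norm_num) (by norm_num)]
      have hidx : (PySem.Int.mod (l.length : Int) 5).toNat = l.length % 5 := by
        rw [hmod]; omega
      rw [hidx]
      have c0 : (((l.length : Int)) % 5 = 0) ↔ (l.length % 5 = 0) := by omega
      have c1 : (((l.length : Int)) % 5 = 1) ↔ (l.length % 5 = 1) := by omega
      have c2 : (((l.length : Int)) % 5 = 2) ↔ (l.length % 5 = 2) := by omega
      have c3 : (((l.length : Int)) % 5 = 3) ↔ (l.length % 5 = 3) := by omega
      have c4 : (((l.length : Int)) % 5 = 4) ↔ (l.length % 5 = 4) := by omega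
      simp only [c0, c1, c2, c3, c4]
      have hlt : l.length % 5 < 5 := Nat.mod_lt _ (by norm_num)
      interval_cases h : l.length % 5 <;>
        simp [List.set, List.getD]

-- ===== VERDICT (by name: the statement is the Claim_ definition above) =====
theorem IC5_spec : Claim_equal_IC5 := by
  intro a _
  unfold Spec_IC5 IC5 IC5_alt
  rw [scatter_eq]
  have h5 : PySem.List.pyRange 0 5 1 = [0, 1, 2, 3, 4] := by decide
  rw [h5]
  simp [List.foldl]
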